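-- pv_equiv track=rewrite | github.com/kaelinwanghu/MateoAndCo | RookPolynomial.py | get_board_ID
-- ===== SOURCE A (Python) =====
-- def get_board_ID(board):
--     ID = [[], []]
--     for row in board:
--         ID[0].append(sum(row))
--     for i in range(len(board[0])):
--         count = 0
--         for j in range(len(board)):
--             count += board[j][i]
--         ID[1].append(count)
--     ID[0] = " ".join(map(str, sorted(ID[0])))
--     ID[1] = " ".join(map(str, sorted(ID[1])))
--     ID = ID[0] + "|" + ID[1]
--     return ID
-- ===== SOURCE B (Python) =====
-- def get_board_ID(board):
--     cols = [0] * len(board[0])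
--     rows = []
--     for row in board:
--         rows.append(sum(row))
--         cols = [c + v for c, v in zip(cols, row)]
--     return " ".join(map(str, sorted(rows))) + "|" + " ".join(map(str, sorted(cols)))
-- ===== Notes on version B (the rewrite author's own statement) =====
-- stated objective: simpler
-- what changed: Replaces A's separate row-sum pass plus a column pass that re-scans the whole board per column index with a single pass over the rows maintaining both the row-sum list and a running column-sum vector updated by zip-add.
import Mathlib
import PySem

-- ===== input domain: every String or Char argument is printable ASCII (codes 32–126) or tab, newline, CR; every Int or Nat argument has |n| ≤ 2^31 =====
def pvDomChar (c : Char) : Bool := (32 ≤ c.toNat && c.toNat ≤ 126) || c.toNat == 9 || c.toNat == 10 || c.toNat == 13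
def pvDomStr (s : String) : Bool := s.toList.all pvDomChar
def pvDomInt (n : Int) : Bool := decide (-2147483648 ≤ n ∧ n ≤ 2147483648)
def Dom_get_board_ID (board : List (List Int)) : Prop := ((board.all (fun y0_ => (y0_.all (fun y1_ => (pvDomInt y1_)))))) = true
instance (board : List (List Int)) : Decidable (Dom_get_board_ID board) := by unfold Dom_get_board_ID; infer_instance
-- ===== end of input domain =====

-- B replaces A's row-sum pass plus a column-rescanning nested loop by ONE pass over the
-- rows that maintains both the row sums and a running column-sum vector (zip add); simpler.

-- ===== PORT A =====
def get_board_ID (board : List (List Int)) : String :=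
  let id0 : List Int := board.foldl (fun acc row => acc ++ [row.sum]) []
  let id1 : List Int :=
    (PySem.List.pyRange 0 ((PySem.List.pyGetD board 0 []).length : Int) 1).foldl
      (fun acc i =>
        acc ++ [(PySem.List.pyRange 0 (board.length : Int) 1).foldl
          (fun count j => count + PySem.List.pyGetD (PySem.List.pyGetD board j []) i 0) 0]) []
  let s0 := PySem.Str.join " " ((PySem.List.sorted id0 (fun x => x) false).map PySem.Int.toStr)
  let s1 := PySem.Str.join " " ((PySem.List.sorted id1 (fun x => x) false).map PySem.Int.toStr)
  s0 ++ "|" ++ s1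

-- ===== PORT B =====
def get_board_ID_alt (board : List (List Int)) : String :=
  let st : List Int × List Int :=
    board.foldl
      (fun st row => (st.1 ++ [row.sum], List.zipWith (· + ·) st.2 row))
      ([], List.replicate (PySem.List.pyGetD board 0 []).length 0)
  PySem.Str.join " " ((PySem.List.sorted st.1 (fun x => x) false).map PySem.Int.toStr)
    ++ "|" ++
  PySem.Str.join " " ((PySem.List.sorted st.2 (fun x => x) false).map PySem.Int.toStr)

-- ===== PRECONDITION & SPEC =====
-- A raises IndexError on the empty board (board[0]) and on boards whose later rows are
-- shorter than the first row (board[j][i]); Pre_ excludes exactly those inputs.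
def Pre_get_board_ID (board : List (List Int)) : Prop :=
  board ≠ [] ∧ ∀ row ∈ board, (board.headD []).length ≤ row.length
instance (board : List (List Int)) : Decidable (Pre_get_board_ID board) := by
  unfold Pre_get_board_ID; infer_instance
def pvWitness_get_board_ID : List (List Int) := [[1, 2], [3, 4]]
def Spec_get_board_ID (board : List (List Int)) (out : String) : Prop := out = get_board_ID_alt board
instance (board : List (List Int)) (out : String) : Decidable (Spec_get_board_ID board out) := by unfold Spec_get_board_ID; infer_instance

-- ===== CLAIM (what is proved, stated in full; the proofs are below) =====
def Claim_equal_get_board_ID : Prop := ∀ (board : List (List Int)), Dom_get_board_ID board → Pre_get_board_ID board → Spec_get_board_ID board (get_board_ID board)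

-- ===== LEMMAS AND PROOFS =====

-- range-map of getD reproduces the list itself
theorem map_range_getD (c : List Int) :
    (List.range c.length).map (fun k => c.getD k 0) = c := by
  apply List.ext_getElem
  · simp
  · intro i h1 h2
    simp [List.getD_eq_getElem?_getD, List.getElem?_eq_getElem h2]

-- the running column-sum fold, characterised entrywise
theorem foldl_zipWith_add (board : List (List Int)) (c : List Int)
    (h : ∀ row ∈ board, c.length ≤ row.length) :
    board.foldl (fun c row => List.zipWith (· + ·) c row) c
      = (List.range c.length).map
          (fun k => c.getD k 0 + (board.map (fun row => row.getD k 0)).sum) := by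
  induction board generalizing c with
  | nil => simpa using (map_range_getD c).symm
  | cons row rest ih =>
    have hlen : c.length ≤ row.length := h row (by simp)
    have hzlen : (List.zipWith (· + ·) c row).length = c.length := by
      simp [List.length_zipWith]; omega
    have := ih (List.zipWith (· + ·) c row)
      (fun r hr => by rw [hzlen]; exact h r (by simp [hr]))
    rw [List.foldl_cons, this, hzlen]
    apply List.map_congr_left
    intro k hk
    have hk' : k < c.length := List.mem_range.mp hk
    have hkr : k < row.length := lt_of_lt_of_le hk' hlen
    have : (List.zipWith (· + ·) c row).getD k 0 = c.getD k 0 + row.getD k 0 := by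
      have hkz : k < (List.zipWith (· + ·) c row).length := by omega
      rw [List.getD_eq_getElem _ _ hkz, List.getElem_zipWith,
          List.getD_eq_getElem _ _ hk', List.getD_eq_getElem _ _ hkr]
    rw [this]
    simp [add_assoc]

-- ===== VERDICT (by name: the statement is the Claim_ definition above) =====
theorem get_board_ID_spec : Claim_equal_get_board_ID := by
  intro board _ hpre
  obtain ⟨hne, hrows⟩ := hpre
  unfold Spec_get_board_ID get_board_ID get_board_ID_alt
  -- board[0] is the head
  have h0 : PySem.List.pyGetD board 0 [] = board.headD [] := by
    cases board with
    | nil => exact absurd rfl hne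
    | cons r rs => simp [PySem.List.pyGetD_zero_cons]
  set C := (board.headD []).length with hC
  rw [h0]
  -- B's fold splits into two independent folds
  rw [PySem.List.foldl_prod_mk
        (f := fun acc (row : List Int) => acc ++ [row.sum])
        (g := fun acc (row : List Int) => List.zipWith (· + ·) acc row)]
  -- row sums agree definitionally
  -- A's column list: fold over pyRange appending = map over range
  have hA : (PySem.List.pyRange 0 (C : Int) 1).foldl
      (fun acc i =>
        acc ++ [(PySem.List.pyRange 0 (board.length : Int) 1).foldl
          (fun count j => count + PySem.List.pyGetD (PySem.List.pyGetD board j []) i 0) 0]) []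
      = (List.range C).map
          (fun k => (board.map (fun row => row.getD k 0)).sum) := by
    rw [PySem.List.pyRange_one 0 (C : Int), Int.sub_zero, Int.toNat_natCast,
        List.foldl_map, PySem.List.foldl_append_singleton_eq_map]
    simp only [List.nil_append]
    apply List.map_congr_left
    intro k hk
    rw [PySem.List.foldl_pyRange_zero_pyGetD'
          (f := fun (count : Int) (row : List Int) =>
            count + PySem.List.pyGetD row ((0 : Int) + (k : Int)) 0)]
    rw [PySem.List.foldl_add (g := fun row => PySem.List.pyGetD row ((0 : Int) + (k : Int)) 0)]
    simp [PySem.List.pyGetD_natCast]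
  have hB := foldl_zipWith_add board (List.replicate C 0)
      (fun row hr => by simpa using hrows row hr)
  rw [hA, hB]
  simp

-- ===== END =====
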